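-- pv_equiv track=rewrite | github.com/MinHoon-LEE/Ps_Sql | Programmers/Algorithm/Python/70130/70130.py | solution
-- ===== SOURCE A (Python) =====
-- from collections import Counter
--
-- def solution(a):
--     if len(a) < 4:
--         return 0
--     counter = Counter(a)
--     answer = 0
--     for x in counter.keys():
--         if counter[x] < answer:
--             continue
--         i = 0
--         cnt = 0
--         while i < len(a) - 1:
--             if (a[i] == a[i + 1]) or (a[i] != x and a[i + 1] != x):
--                 i += 1
--             else:
--                 i += 2
--                 cnt += 1
--         answer = max(answer, cnt)
--     return answer * 2
-- ===== SOURCE B (Python) =====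
-- def solution(a):
--     n = len(a)
--     if n < 4:
--         return 0
--     occ = {}
--     for i, v in enumerate(a):
--         occ.setdefault(v, []).append(i)
--     best = 0
--     for ps in occ.values():
--         cnt = 0
--         ptr = 0
--         m = len(ps)
--         for k, p in enumerate(ps):
--             if ptr < p:
--                 # pointer is behind p: the scan walks to p-1 (no x in between)
--                 # and pairs (p-1, p)
--                 cnt += 1
--                 ptr = p + 1
--             elif p + 1 < n and (k + 1 == m or ps[k + 1] != p + 1):
--                 # pair (p, p+1): successor exists and is not x
--                 cnt += 1
--                 ptr = p + 2
--             else: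
--                 ptr = p + 1
--         best = max(best, cnt)
--     return best * 2
-- ===== Notes on version B (the rewrite author's own statement) =====
-- stated objective: faster
-- what changed: Instead of re-scanning the whole array with a greedy while-loop for every distinct value, B builds each value's occurrence-position list in one pass and replays the greedy pairing per value using only those positions with a carried jump pointer, making total work linear.
import Mathlib
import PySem

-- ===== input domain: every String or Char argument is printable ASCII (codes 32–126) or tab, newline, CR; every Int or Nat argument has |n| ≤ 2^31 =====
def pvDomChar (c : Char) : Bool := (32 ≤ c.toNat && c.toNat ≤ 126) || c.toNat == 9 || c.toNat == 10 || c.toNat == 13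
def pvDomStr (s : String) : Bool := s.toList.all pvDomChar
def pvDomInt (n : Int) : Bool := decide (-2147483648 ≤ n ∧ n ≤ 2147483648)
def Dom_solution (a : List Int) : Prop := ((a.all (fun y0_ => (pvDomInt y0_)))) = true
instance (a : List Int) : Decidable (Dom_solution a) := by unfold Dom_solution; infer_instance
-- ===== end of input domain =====

-- B replaces A's per-value full rescan by a per-value walk over that value's
-- occurrence positions (built once), carrying the greedy jump pointer: faster (asymptotic).

-- ===== PORT A =====
-- A's inner 'while i < len(a)-1' loop; i starts at 0 and only grows.
def scanA (a : List Int) (x : Int) (i cnt : Int) : Int :=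
  if _h : i < PySem.List.len a - 1 then
    if PySem.List.pyGetD a i 0 = PySem.List.pyGetD a (i + 1) 0 ∨
       (PySem.List.pyGetD a i 0 ≠ x ∧ PySem.List.pyGetD a (i + 1) 0 ≠ x) then
      scanA a x (i + 1) cnt
    else
      scanA a x (i + 2) (cnt + 1)
  else cnt
termination_by (PySem.List.len a - i).toNat
decreasing_by all_goals (simp [PySem.List.len_eq] at *; omega)

def solution (a : List Int) : Int :=
  if PySem.List.len a < 4 then 0
  else
    let counter := PySem.Dict.counter a
    let answer := counter.keys.foldl
      (fun answer x =>
        if counter.getD x 0 < answer then answer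
        else max answer (scanA a x 0 0)) 0
    answer * 2

-- ===== PORT B =====
-- Source B's inner loop over one value's occurrence positions ps (with one-element lookahead).
def goB (n : Int) (cnt ptr : Int) : List Int → Int
  | [] => cnt
  | p :: ps =>
    if ptr < p then goB n (cnt + 1) (p + 1) ps
    else if p + 1 < n ∧ ps.head? ≠ some (p + 1) then
      goB n (cnt + 1) (p + 2) ps
    else goB n cnt (p + 1) ps

def solution_alt (a : List Int) : Int :=
  let n := PySem.List.len a
  if n < 4 then 0
  else
    let occ := (PySem.List.enumerate a 0).foldl
      (fun d p => d.modify p.2 [] (· ++ [p.1])) PySem.Dict.empty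
    let best := occ.values.foldl (fun best ps => max best (goB n 0 0 ps)) 0
    best * 2

-- ===== PRECONDITION & SPEC =====
def Spec_solution (a : List Int) (out : Int) : Prop := out = solution_alt a
instance (a : List Int) (out : Int) : Decidable (Spec_solution a out) := by unfold Spec_solution; infer_instance

-- ===== CLAIM (what is proved, stated in full; the proofs are below) =====
def Claim_equal_solution : Prop := ∀ (a : List Int), Dom_solution a → Spec_solution a (solution a)

-- ===== LEMMAS AND PROOFS =====

-- positions (indices) at which x occurs in a, in increasing order
def posOf (x : Int) (a : List Int) : List Int :=
  ((PySem.List.enumerate a 0).filter (fun p => p.2 == x)).map (·.1)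

lemma posOf_pairwise (x : Int) (a : List Int) : (posOf x a).Pairwise (· < ·) := by
  unfold posOf
  exact List.pairwise_map.mpr ((PySem.List.pairwise_lt_enumerate a 0).filter _)

lemma mem_posOf (x : Int) (a : List Int) (j : Int) :
    j ∈ posOf x a ↔ ∃ (k : Nat) (_ : k < a.length), j = (k : Int) ∧ a[k] = x := by
  unfold posOf
  simp only [List.mem_map, List.mem_filter]
  constructor
  · rintro ⟨p, ⟨hp, hx⟩, rfl⟩
    rcases (PySem.List.mem_enumerate_iff _ _ _).mp hp with ⟨k, hk, rfl⟩
    exact ⟨k, hk, by simp, by simpa using hx⟩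
  · rintro ⟨k, hk, rfl, hx⟩
    exact ⟨((k : Int), a[k]), ⟨(PySem.List.mem_enumerate_iff _ _ _).mpr ⟨k, hk, by simp⟩, by simpa using hx⟩, rfl⟩

lemma length_posOf (x : Int) (a : List Int) : (posOf x a).length = a.count x := by
  unfold posOf
  rw [List.length_map]
  suffices h : ∀ (s : Int), ((PySem.List.enumerate a s).filter (fun p => p.2 == x)).length = a.count x from h 0
  induction a with
  | nil => intro s; simp [PySem.List.enumerate_nil]
  | cons h t ih =>
    intro s
    rw [PySem.List.enumerate_cons]
    by_cases hx : h = x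
    · subst hx; simp [ih (s + 1)]
    · simp [hx, ih (s + 1)]

lemma goB_le (n : Int) (ps : List Int) : ∀ (cnt ptr : Int), goB n cnt ptr ps ≤ cnt + ps.length := by
  induction ps with
  | nil => intro cnt ptr; simp [goB]
  | cons p ps ih =>
    intro cnt ptr
    simp only [goB, List.length_cons]
    split_ifs with h1 h2
    · have := ih (cnt + 1) (p + 1); push_cast at *; omega
    · have := ih (cnt + 1) (p + 2); push_cast at *; omega
    · have := ih cnt (p + 1); push_cast at *; omega

lemma goB_eq_of_lt_head (n cnt ptr ptr' : Int) (ps : List Int)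
    (h : ∀ q, ps.head? = some q → ptr < q ∧ ptr' < q) :
    goB n cnt ptr ps = goB n cnt ptr' ps := by
  cases ps with
  | nil => rfl
  | cons p ps =>
    obtain ⟨h1, h2⟩ := h p rfl
    simp [goB, h1, h2]

lemma filt_step (i : Int) (l : List Int) (hs : l.Pairwise (· < ·)) :
    l.filter (fun p => decide (i ≤ p)) =
      (if i ∈ l then [i] else []) ++ l.filter (fun p => decide (i + 1 ≤ p)) := by
  induction l with
  | nil => simp
  | cons p ps ih =>
    have hps := hs.of_cons
    have hall : ∀ q ∈ ps, p < q := fun q hq => (List.pairwise_cons.mp hs).1 q hq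
    rcases lt_trichotomy p i with hpi | rfl | hip
    · have h1 : ¬ (i ≤ p) := by omega
      have h2 : ¬ (i + 1 ≤ p) := by omega
      simp only [List.filter_cons, decide_eq_true_eq]
      rw [if_neg h1, if_neg h2, ih hps]
      have : (i ∈ p :: ps) = (i ∈ ps) := by
        simp [List.mem_cons]; intro h; omega
      simp [List.mem_cons, show ¬ i = p by omega]
    · -- p = i
      have hmem : p ∈ p :: ps := List.mem_cons_self
      have h2 : ¬ (p + 1 ≤ p) := by omega
      simp only [List.filter_cons, decide_eq_true_eq]
      rw [if_pos le_rfl, if_neg h2, if_pos hmem, List.cons_append, List.nil_append]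
      congr 1
      apply List.filter_congr
      intro q hq
      have := hall q hq
      simp only [decide_eq_decide]
      omega
    · have h1 : i ≤ p := by omega
      have h2 : i + 1 ≤ p := by omega
      have hnmem : i ∉ p :: ps := by
        simp only [List.mem_cons]
        rintro (rfl | h)
        · omega
        · have := hall i h; omega
      simp only [List.filter_cons, decide_eq_true_eq]
      rw [if_pos h1, if_pos h2, if_neg hnmem, ih hps, List.nil_append]
      have : i ∉ ps := fun h => by have := hall i h; omega
      simp [this]

lemma mem_P_ge (x j q : Int) (a : List Int)
    (h : q ∈ (posOf x a).filter (fun p => decide (j ≤ p))) : q ∈ posOf x a ∧ j ≤ q := by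
  have := List.mem_filter.mp h
  simpa using this

lemma mem_posOf_iff_of_bounds (x i : Int) (a : List Int) (hi : 0 ≤ i) (hlt : i.toNat < a.length) :
    i ∈ posOf x a ↔ a[i.toNat] = x := by
  rw [mem_posOf]
  constructor
  · rintro ⟨k, hk, hkeq, hxk⟩
    have hk' : k = i.toNat := by omega
    subst hk'; exact hxk
  · intro hxk
    exact ⟨i.toNat, hlt, by omega, hxk⟩

lemma posOf_bounds (x : Int) (a : List Int) : ∀ q ∈ posOf x a, 0 ≤ q ∧ q < (a.length : Int) := by
  intro q hq
  rcases (mem_posOf x a q).mp hq with ⟨k, hk, rfl, _⟩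
  exact ⟨Int.natCast_nonneg k, by exact_mod_cast hk⟩

lemma goB_cons (n cnt ptr p : Int) (ps : List Int) :
    goB n cnt ptr (p :: ps) =
      if ptr < p then goB n (cnt + 1) (p + 1) ps
      else if p + 1 < n ∧ ps.head? ≠ some (p + 1) then goB n (cnt + 1) (p + 2) ps
      else goB n cnt (p + 1) ps := rfl

lemma scan_eq (a : List Int) (x : Int) :
    ∀ (m : Nat) (i cnt : Int), 0 ≤ i → a.length + 2 ≤ m + i.toNat →
      scanA a x i cnt = goB (a.length : Int) cnt i ((posOf x a).filter (fun p => decide (i ≤ p))) := by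
  intro m
  induction m with
  | zero =>
    intro i cnt hi hm
    rw [scanA, dif_neg (by simp only [PySem.List.len_eq]; omega)]
    have hnil : (posOf x a).filter (fun p => decide (i ≤ p)) = [] := by
      rw [List.filter_eq_nil_iff]
      intro q hq
      have := posOf_bounds x a q hq
      simp only [decide_eq_true_eq]
      omega
    rw [hnil]
    rfl
  | succ m ih =>
    intro i cnt hi hm
    have hpw := posOf_pairwise x a
    have hbound := posOf_bounds x a
    rw [scanA]
    simp only [PySem.List.len_eq]
    by_cases h : i < (a.length : Int) - 1
    · -- i < n - 1
      rw [dif_pos h]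
      have hk1 : i.toNat < a.length := by omega
      have hk2 : (i + 1).toNat < a.length := by omega
      rw [PySem.List.pyGetD_eq_getElem a (i := i) 0 hi (by omega),
          PySem.List.pyGetD_eq_getElem a (i := i + 1) 0 (by omega) (by omega)]
      have hmi := mem_posOf_iff_of_bounds x i a hi hk1
      have hmi1 := mem_posOf_iff_of_bounds x (i + 1) a (by omega) hk2
      rw [filt_step i _ hpw]
      by_cases hx1 : a[i.toNat] = x
      · rw [if_pos (hmi.mpr hx1), List.singleton_append]
        by_cases hx2 : a[(i + 1).toNat] = x
        · -- both equal x: a[i] = a[i+1], scan moves by 1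
          rw [if_pos (Or.inl (hx1.trans hx2.symm))]
          have hP1 : (posOf x a).filter (fun p => decide (i + 1 ≤ p)) =
              (i + 1) :: (posOf x a).filter (fun p => decide (i + 1 + 1 ≤ p)) := by
            rw [filt_step (i + 1) _ hpw, if_pos (hmi1.mpr hx2), List.singleton_append]
          rw [goB_cons, if_neg (lt_irrefl i), if_neg (by rw [hP1]; simp)]
          exact ih (i + 1) cnt (by omega) (by omega)
        · -- a[i] = x, a[i+1] ≠ x: pair (i, i+1)
          rw [if_neg (by
            simp only [not_or, not_and]
            exact ⟨fun heq => hx2 (heq.symm.trans hx1), fun hc => absurd hx1 hc⟩)]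
          have hstep1 : (posOf x a).filter (fun p => decide (i + 1 ≤ p)) =
              (posOf x a).filter (fun p => decide (i + 2 ≤ p)) := by
            rw [filt_step (i + 1) _ hpw, if_neg (fun hc => hx2 (hmi1.mp hc)), List.nil_append]
            simp [show i + 1 + 1 = i + 2 by ring]
          rw [goB_cons, if_neg (lt_irrefl i), if_pos ?_, hstep1]
          · exact ih (i + 2) (cnt + 1) (by omega) (by omega)
          · refine ⟨by omega, ?_⟩
            rw [hstep1]
            intro hc
            cases hh : ((posOf x a).filter (fun p => decide (i + 2 ≤ p))).head? with
            | none => rw [hh] at hc; cases hc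
            | some q =>
              rw [hh] at hc
              have hq2 := Option.some_inj.mp hc
              have := mem_P_ge x (i + 2) q a (List.mem_of_mem_head? (by rw [hh]; rfl))
              omega
      · rw [if_neg (fun hc => hx1 (hmi.mp hc)), List.nil_append]
        by_cases hx2 : a[(i + 1).toNat] = x
        · -- a[i] ≠ x, a[i+1] = x: pair (i, i+1)
          rw [if_neg (by
            simp only [not_or, not_and]
            exact ⟨fun heq => hx1 (heq.trans hx2), fun _ hc => hc hx2⟩)]
          rw [filt_step (i + 1) _ hpw, if_pos (hmi1.mpr hx2), List.singleton_append]
          rw [goB_cons, if_pos (by omega), show i + 1 + 1 = i + 2 by ring]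
          exact ih (i + 2) (cnt + 1) (by omega) (by omega)
        · -- neither is x: scan moves by 1
          rw [if_pos (Or.inr ⟨hx1, hx2⟩)]
          rw [goB_eq_of_lt_head ((a.length : Int)) cnt i (i + 1) _ ?_]
          · exact ih (i + 1) cnt (by omega) (by omega)
          · intro q hq
            have hmem := mem_P_ge x (i + 1) q a (List.mem_of_mem_head? (by rw [hq]; rfl))
            have hne : q ≠ i + 1 := fun hqe => hx2 (hmi1.mp (hqe ▸ hmem.1))
            constructor <;> omega
    · -- i ≥ n - 1: the while loop is over
      rw [dif_neg h]
      rw [filt_step i _ hpw]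
      have hrest : (posOf x a).filter (fun p => decide (i + 1 ≤ p)) = [] := by
        rw [List.filter_eq_nil_iff]
        intro q hq
        have := hbound q hq
        simp only [decide_eq_true_eq]
        omega
      rw [hrest]
      by_cases hc : i ∈ posOf x a
      · have hib := hbound i hc
        rw [if_pos hc, List.singleton_append, goB_cons]
        rw [if_neg (by omega), if_neg (by simp only [not_and, ne_eq, not_not]; intro hcc; omega)]
        rfl
      · rw [if_neg hc]
        rfl

lemma scanA_eq_goB_posOf (a : List Int) (x : Int) :
    scanA a x 0 0 = goB (a.length : Int) 0 0 (posOf x a) := by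
  have h := scan_eq a x (a.length + 2) 0 0 le_rfl (by omega)
  rwa [List.filter_eq_self.mpr (fun q hq => by simpa using (posOf_bounds x a q hq).1)] at h

lemma occ_getD (a : List Int) (c : Int) :
    ((PySem.List.enumerate a 0).foldl (fun d p => d.modify p.2 [] (· ++ [p.1]))
      PySem.Dict.empty).getD c [] = posOf c a := by
  have hfold : (PySem.List.enumerate a 0).foldl (fun d p => d.modify p.2 [] (· ++ [p.1]))
      (PySem.Dict.empty : PySem.Dict Int (List Int)) =
      ((PySem.List.enumerate a 0).map (fun p => (p.2, p.1))).foldl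
        (fun d p => d.modify p.1 [] (· ++ [p.2])) PySem.Dict.empty := by
    rw [List.foldl_map]
  rw [hfold, PySem.Dict.getD_foldl_modify_append]
  simp [posOf, List.filter_map, Function.comp_def]

lemma occ_keys (a : List Int) :
    ((PySem.List.enumerate a 0).foldl (fun d p => d.modify p.2 [] (· ++ [p.1]))
      PySem.Dict.empty).keys = PySem.Set.ofList a := by
  rw [PySem.Dict.keys_foldl_modify_key (PySem.List.enumerate a 0) (fun p => p.2) []
      (fun _ p => (· ++ [p.1])) PySem.Dict.empty]
  rw [PySem.Dict.keys_empty, PySem.List.map_snd_enumerate]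
  rfl

lemma occ_nodup (a : List Int) :
    ((PySem.List.enumerate a 0).foldl (fun d p => d.modify p.2 [] (· ++ [p.1]))
      PySem.Dict.empty).keys.Nodup :=
  PySem.Dict.nodup_keys_foldl_modify_key (PySem.List.enumerate a 0) (fun p => p.2) []
    (fun _ p => (· ++ [p.1])) PySem.Dict.empty (by simp [PySem.Dict.keys_empty])


-- ===== VERDICT (by name: the statement is the Claim_ definition above) =====
theorem solution_spec : Claim_equal_solution := by
  unfold Claim_equal_solution Spec_solution
  intro a _
  unfold solution solution_alt
  by_cases hlen : PySem.List.len a < 4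
  · rw [if_pos hlen, if_pos hlen]
  · rw [if_neg hlen, if_neg hlen]
    dsimp only
    congr 1
    -- B's fold over occ.values
    rw [PySem.Dict.values_eq_map_keys _ (occ_nodup a) [], occ_keys a]
    rw [List.foldl_map]
    have hB : ∀ (b k : Int), max b (goB (PySem.List.len a) 0 0
        (((PySem.List.enumerate a 0).foldl (fun d p => d.modify p.2 [] (· ++ [p.1]))
          PySem.Dict.empty).getD k [])) = max b (goB (a.length : Int) 0 0 (posOf k a)) := by
      intro b k
      rw [occ_getD a k, PySem.List.len_eq]
    rw [PySem.List.foldl_congr_mem _ _ _ _ (fun b k _ => hB b k)]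
    -- A's fold over counter.keys
    rw [PySem.Dict.keys_counter]
    apply PySem.List.foldl_congr_mem
    intro ans x _
    rw [PySem.Dict.getD_counter]
    by_cases hlt : ((a.count x : Int)) < ans
    · rw [if_pos hlt]
      have h1 := goB_le (a.length : Int) (posOf x a) 0 0
      rw [length_posOf] at h1
      exact (max_eq_left (by omega)).symm
    · rw [if_neg hlt, scanA_eq_goB_posOf]
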